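-- pv_equiv track=rewrite | github.com/AMD-AGI/TraceLens | TraceLens/AgenticMode/Standalone/category_analyses/kernel_fusion_analysis.py | _split_into_subgroups
-- ===== SOURCE A (Python) =====
-- _MATRIX_SPECS = frozenset(
--     {
--         "matrix_fp16",
--         "matrix_bf16",
--         "matrix_fp32",
--         "matrix_fp64",
--         "matrix_fp8",
--         "matrix_int8",
--     }
-- )
--
-- def _is_matrix_op(kernel_info: dict) -> bool:
--     """Check if a kernel uses matrix compute units (GEMM, conv, etc.)."""
--     cspec = kernel_info.get("compute_spec")
--     if cspec and cspec in _MATRIX_SPECS: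
--         return True
--     ktype = kernel_info.get("type", "").upper()
--     return "GEMM" in ktype or "CONV" in ktype
--
-- def _split_into_subgroups(enriched_kernels):
--     """Split kernel sequence at GEMM boundaries into fusable sub-groups.
--
--     Returns list of (subgroup_type, kernels) where subgroup_type is:
--       "gemm_epilogue" - GEMM followed by elementwise ops
--       "elementwise"   - consecutive non-GEMM ops
--       "gemm_only"     - standalone GEMM with no trailing elementwise
--     """
--     subgroups = []
--     current = []
--     for k in enriched_kernels:
--         if _is_matrix_op(k) and current:
--             subgroups.append(current)
--             current = [k]
--         else:
--             current.append(k)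
--     if current:
--         subgroups.append(current)
--
--     typed = []
--     for sg in subgroups:
--         has_gemm = any(_is_matrix_op(k) for k in sg)
--         has_non_gemm = any(not _is_matrix_op(k) for k in sg)
--         if has_gemm and has_non_gemm:
--             typed.append(("gemm_epilogue", sg))
--         elif has_gemm:
--             typed.append(("gemm_only", sg))
--         else:
--             typed.append(("elementwise", sg))
--     return typed
-- ===== SOURCE B (Python) =====
-- _MATRIX_SPECS = frozenset(
--     {
--         "matrix_fp16",
--         "matrix_bf16",
--         "matrix_fp32",
--         "matrix_fp64",
--         "matrix_fp8",
--         "matrix_int8",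
--     }
-- )
--
-- def _is_matrix_op(kernel_info: dict) -> bool:
--     cspec = kernel_info.get("compute_spec")
--     if cspec and cspec in _MATRIX_SPECS:
--         return True
--     ktype = kernel_info.get("type", "").upper()
--     return "GEMM" in ktype or "CONV" in ktype
--
-- def _classify(has_gemm, has_non_gemm, kernels):
--     if has_gemm and has_non_gemm:
--         return ("gemm_epilogue", kernels)
--     if has_gemm:
--         return ("gemm_only", kernels)
--     return ("elementwise", kernels)
--
-- def _split_into_subgroups(enriched_kernels):
--     """Single pass: classify each subgroup incrementally from two flags."""
--     typed = []
--     current = []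
--     has_gemm = False
--     has_non_gemm = False
--     for k in enriched_kernels:
--         m = _is_matrix_op(k)
--         if m and current:
--             typed.append(_classify(has_gemm, has_non_gemm, current))
--             current = [k]
--             has_gemm, has_non_gemm = True, False
--         else:
--             current.append(k)
--             has_gemm = has_gemm or m
--             has_non_gemm = has_non_gemm or not m
--     if current:
--         typed.append(_classify(has_gemm, has_non_gemm, current))
--     return typed
-- ===== Notes on version B (the rewrite author's own statement) =====
-- stated objective: simpler
-- what changed: B fuses A's two phases (split into subgroups, then reclassify each by rescanning it with any()) into one pass that maintains has_gemm/has_non_gemm flags incrementally and emits each classified subgroup as soon as it closes.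
import Mathlib
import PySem

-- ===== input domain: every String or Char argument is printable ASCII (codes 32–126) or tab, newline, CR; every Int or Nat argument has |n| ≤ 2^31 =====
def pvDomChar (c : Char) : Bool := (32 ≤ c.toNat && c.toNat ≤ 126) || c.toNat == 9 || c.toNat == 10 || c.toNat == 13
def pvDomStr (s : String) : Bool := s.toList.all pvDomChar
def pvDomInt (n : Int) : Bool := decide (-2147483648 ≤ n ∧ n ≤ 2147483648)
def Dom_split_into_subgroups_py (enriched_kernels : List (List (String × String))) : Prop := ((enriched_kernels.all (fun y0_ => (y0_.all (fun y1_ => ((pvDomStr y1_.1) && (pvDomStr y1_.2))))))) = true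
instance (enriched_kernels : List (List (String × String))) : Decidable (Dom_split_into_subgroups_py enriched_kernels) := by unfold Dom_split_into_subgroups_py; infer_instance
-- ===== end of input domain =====

-- B fuses A's two passes (split, then reclassify each subgroup with any()) into one pass with incremental flags; objective: simpler.

-- ===== PORT A =====
def matrixSpecs : List String :=
  ["matrix_fp16", "matrix_bf16", "matrix_fp32", "matrix_fp64", "matrix_fp8", "matrix_int8"]

-- _is_matrix_op: shared helper of both Pythons
def isMatrixOp (k : List (String × String)) : Bool :=
  let cspec := (PySem.Dict.mk k).get? "compute_spec"
  if (match cspec with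
      | some s => (s != "") && matrixSpecs.contains s
      | none => false) then
    true
  else
    let ktype := PySem.Str.upper ((PySem.Dict.mk k).getD "type" "")
    PySem.Str.isIn "GEMM" ktype || PySem.Str.isIn "CONV" ktype

-- A's first loop: accumulate (subgroups, current)
def aLoop : List (List (String × String)) → List (List (List (String × String))) →
    List (List (String × String)) →
    List (List (List (String × String))) × List (List (String × String))
  | [], sgs, cur => (sgs, cur)
  | k :: rest, sgs, cur =>
    if isMatrixOp k && !cur.isEmpty then aLoop rest (sgs ++ [cur]) [k]
    else aLoop rest sgs (cur ++ [k])

-- A's second loop body: classify one subgroup by rescanning it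
def classifyA (sg : List (List (String × String))) :
    String × List (List (String × String)) :=
  let has_gemm := sg.any isMatrixOp
  let has_non_gemm := sg.any (fun k => !isMatrixOp k)
  if has_gemm && has_non_gemm then ("gemm_epilogue", sg)
  else if has_gemm then ("gemm_only", sg)
  else ("elementwise", sg)

def split_into_subgroups_py (enriched_kernels : List (List (String × String))) :
    List (String × (List (List (String × String)))) :=
  let p := aLoop enriched_kernels [] []
  let sgs := if !p.2.isEmpty then p.1 ++ [p.2] else p.1
  sgs.map classifyA

-- ===== PORT B =====
def classifyB (hg hng : Bool) (kernels : List (List (String × String))) :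
    String × List (List (String × String)) :=
  if hg && hng then ("gemm_epilogue", kernels)
  else if hg then ("gemm_only", kernels)
  else ("elementwise", kernels)

-- B's single loop: typed output, current subgroup and its two flags
def bLoop : List (List (String × String)) →
    List (String × List (List (String × String))) →
    List (List (String × String)) → Bool → Bool →
    List (String × List (List (String × String)))
  | [], typed, cur, hg, hng =>
    if !cur.isEmpty then typed ++ [classifyB hg hng cur] else typed
  | k :: rest, typed, cur, hg, hng =>
    let m := isMatrixOp k
    if m && !cur.isEmpty then
      bLoop rest (typed ++ [classifyB hg hng cur]) [k] true false
    else
      bLoop rest typed (cur ++ [k]) (hg || m) (hng || !m)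

def split_into_subgroups_py_alt (enriched_kernels : List (List (String × String))) :
    List (String × (List (List (String × String)))) :=
  bLoop enriched_kernels [] [] false false

-- ===== PRECONDITION & SPEC =====
def Spec_split_into_subgroups_py (enriched_kernels : List (List (String × String))) (out : List (String × (List (List (String × String))))) : Prop := out = split_into_subgroups_py_alt enriched_kernels
instance (enriched_kernels : List (List (String × String))) (out : List (String × (List (List (String × String))))) : Decidable (Spec_split_into_subgroups_py enriched_kernels out) := by unfold Spec_split_into_subgroups_py; infer_instance

-- ===== CLAIM (what is proved, stated in full; the proofs are below) =====
def Claim_equal_split_into_subgroups_py : Prop := ∀ (enriched_kernels : List (List (String × String))), Dom_split_into_subgroups_py enriched_kernels → Spec_split_into_subgroups_py enriched_kernels (split_into_subgroups_py enriched_kernels)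

-- ===== LEMMAS AND PROOFS =====

-- A's finishing step, as a function of the loop's final state
def finishA (p : List (List (List (String × String))) × List (List (String × String))) :
    List (String × List (List (String × String))) :=
  (if !p.2.isEmpty then p.1 ++ [p.2] else p.1).map classifyA

lemma aLoop_acc (l : List (List (String × String))) :
    ∀ sgs cur, aLoop l sgs cur = (sgs ++ (aLoop l [] cur).1, (aLoop l [] cur).2) := by
  induction l with
  | nil => intro sgs cur; simp [aLoop]
  | cons k rest ih =>
    intro sgs cur
    simp only [aLoop, List.nil_append]
    split
    · rw [ih (sgs ++ [cur]), ih [cur]]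
      simp
    · exact ih sgs (cur ++ [k])

lemma classifyA_eq (sg : List (List (String × String))) :
    classifyA sg = classifyB (sg.any isMatrixOp) (sg.any fun k => !isMatrixOp k) sg := rfl

lemma bLoop_main (l : List (List (String × String))) :
    ∀ (cur : List (List (String × String)))
      (typed : List (String × List (List (String × String)))),
    bLoop l typed cur (cur.any isMatrixOp) (cur.any fun k => !isMatrixOp k) =
      typed ++ finishA (aLoop l [] cur) := by
  induction l with
  | nil =>
    intro cur typed
    simp only [bLoop, aLoop, finishA]
    by_cases h : cur.isEmpty <;> simp [h, classifyA_eq]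
  | cons k rest ih =>
    intro cur typed
    simp only [bLoop, aLoop]
    by_cases h : isMatrixOp k && !cur.isEmpty
    · simp only [h, if_pos]
      have h1 : isMatrixOp k = true := by
        cases hm : isMatrixOp k <;> simp [hm] at h ⊢
      have := ih [k] (typed ++ [classifyB (cur.any isMatrixOp) (cur.any fun k => !isMatrixOp k) cur])
      simp only [List.any_cons, List.any_nil, h1, Bool.or_false, Bool.not_true] at this
      rw [this]
      simp only [List.nil_append]
      rw [aLoop_acc rest [cur] [k]]
      by_cases h2 : (aLoop rest [] [k]).2.isEmpty <;>
        simp [finishA, h2, classifyA_eq]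
    · simp only [h, if_neg, Bool.false_eq_true, not_false_eq_true]
      have := ih (cur ++ [k]) typed
      simp only [List.any_append, List.any_cons, List.any_nil, Bool.or_false] at this
      exact this

-- ===== VERDICT (by name: the statement is the Claim_ definition above) =====
theorem split_into_subgroups_py_spec : Claim_equal_split_into_subgroups_py := by
  intro ek _
  unfold Spec_split_into_subgroups_py split_into_subgroups_py split_into_subgroups_py_alt
  have := bLoop_main ek [] []
  simp only [List.any_nil, List.nil_append] at this
  rw [this]
  rfl
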